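-- pv_equiv track=rewrite | github.com/rsaxvc/blagr | build_blog.py | filter_URL
-- ===== SOURCE A (Python) =====
-- def filter_URL( input ):
-- 	output = ""
-- 	conversion = {
-- 		' '  : '_',
-- 		'\'' : '',
-- 		'\\' : '',
-- 		'/'  : '',
-- 		'.'  : '',
-- 		'?'  : '',
-- 		':'  : '',
-- 		'>'  : '',
-- 		}
-- 	for char in input:
-- 		if char in conversion:
-- 			output += conversion[char]
-- 		else:
-- 			output += char
-- 	return output
-- ===== SOURCE B (Python) =====
-- def filter_URL(input):
--     return (input.replace(' ', '_')
--                  .replace("'", '')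
--                  .replace('\\', '')
--                  .replace('/', '')
--                  .replace('.', '')
--                  .replace('?', '')
--                  .replace(':', '')
--                  .replace('>', ''))
-- ===== Notes on version B (the rewrite author's own statement) =====
-- stated objective: idiomatic
-- what changed: Replaces A's char-by-char Python loop with dict lookups and incremental string concatenation by a chain of str.replace calls, one full C-level pass per character class; pass order is immaterial because the replacement underscore character is never itself removed.
import Mathlib
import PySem

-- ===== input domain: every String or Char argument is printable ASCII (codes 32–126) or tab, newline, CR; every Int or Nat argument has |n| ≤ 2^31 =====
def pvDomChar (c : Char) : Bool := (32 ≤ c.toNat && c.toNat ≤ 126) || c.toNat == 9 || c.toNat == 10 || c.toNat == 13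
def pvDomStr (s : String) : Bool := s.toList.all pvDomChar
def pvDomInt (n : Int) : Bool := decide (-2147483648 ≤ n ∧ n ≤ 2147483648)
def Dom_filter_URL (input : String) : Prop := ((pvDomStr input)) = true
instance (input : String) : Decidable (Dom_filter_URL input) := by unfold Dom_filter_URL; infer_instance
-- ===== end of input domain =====

-- B replaces A's single char-by-char pass with dict lookups by an idiomatic chain of
-- str.replace calls, one full pass per character class (order is immaterial: '_' is never removed).

-- ===== PORT A =====
-- the literal dict of A
def convA : PySem.Dict Char String := PySem.Dict.ofList
  [(' ', "_"), ('\'', ""), ('\\', ""), ('/', ""), ('.', ""), ('?', ""), (':', ""), ('>', "")]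

def filter_URL (input : String) : String :=
  input.toList.foldl
    (fun output char =>
      if convA.contains char then output ++ convA.getD char ""
      else output ++ String.singleton char) ""

-- ===== PORT B =====
def filter_URL_alt (input : String) : String :=
  PySem.Str.replace (PySem.Str.replace (PySem.Str.replace (PySem.Str.replace
    (PySem.Str.replace (PySem.Str.replace (PySem.Str.replace (PySem.Str.replace
      input " " "_") "'" "") "\\" "") "/" "") "." "") "?" "") ":" "") ">" ""

-- ===== PRECONDITION & SPEC =====
def Spec_filter_URL (input : String) (out : String) : Prop := out = filter_URL_alt input
instance (input : String) (out : String) : Decidable (Spec_filter_URL input out) := by unfold Spec_filter_URL; infer_instance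

-- ===== CLAIM (what is proved, stated in full; the proofs are below) =====
def Claim_equal_filter_URL : Prop := ∀ (input : String), Dom_filter_URL input → Spec_filter_URL input (filter_URL input)

-- ===== LEMMAS AND PROOFS =====

-- A's per-character substitution, as a list of characters
def substA (c : Char) : List Char :=
  if convA.contains c then (convA.getD c "").toList else [c]

-- B's per-character substitution for one replace pass with a single-char pattern
def rep1 (o : Char) (new : List Char) (c : Char) : List Char :=
  if c = o then new else [c]

theorem go_single (o : Char) (new : List Char) :
    ∀ (fuel : Nat) (l acc : List Char), l.length ≤ fuel →
      PySem.Chars.replace.go [o] new fuel l acc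
        = acc.reverse ++ l.flatMap (rep1 o new) := by
  intro fuel
  induction fuel with
  | zero =>
    intro l acc h
    have : l = [] := List.eq_nil_of_length_eq_zero (Nat.le_zero.mp h)
    subst this
    simp [PySem.Chars.replace.go]
  | succ n ih =>
    intro l acc h
    cases l with
    | nil => simp [PySem.Chars.replace.go]
    | cons c t =>
      simp only [PySem.Chars.replace.go]
      by_cases hc : c = o
      · subst hc
        have hpre : [c].isPrefixOf (c :: t) = true := by simp [List.isPrefixOf]
        rw [if_pos hpre]
        rw [ih _ _ (by simpa using Nat.le_of_succ_le_succ h)]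
        simp [rep1]
      · have hpre : [o].isPrefixOf (c :: t) = false := by
          simp [List.isPrefixOf, Ne.symm hc]
        rw [if_neg (by simp [hpre])]
        rw [ih _ _ (by simpa using Nat.le_of_succ_le_succ h)]
        simp [rep1, hc]

theorem replace_single (s : List Char) (o : Char) (new : List Char) :
    PySem.Chars.replace s [o] new = s.flatMap (rep1 o new) := by
  rw [PySem.Chars.replace]
  simp only [List.isEmpty_cons, if_false, Bool.false_eq_true]
  exact go_single o new s.length s [] (le_refl _)

theorem foldA (l : List Char) (out : String) :
    (l.foldl (fun output char =>
        if convA.contains char then output ++ convA.getD char ""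
        else output ++ String.singleton char) out).toList
      = out.toList ++ l.flatMap substA := by
  induction l generalizing out with
  | nil => simp
  | cons c t ih =>
    simp only [List.foldl_cons, List.flatMap_cons, ih, substA]
    by_cases hc : convA.contains c = true
    · simp [hc]
    · simp [hc]

-- the eight passes composed, pointwise
theorem composed_eq_substA (c : Char) :
    (rep1 ' ' ['_'] c).flatMap (fun x => (rep1 '\'' [] x).flatMap (fun x =>
      (rep1 '\\' [] x).flatMap (fun x => (rep1 '/' [] x).flatMap (fun x =>
        (rep1 '.' [] x).flatMap (fun x => (rep1 '?' [] x).flatMap (fun x =>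
          (rep1 ':' [] x).flatMap (rep1 '>' []))))))) = substA c := by
  by_cases h1 : c = ' '
  · subst h1; decide
  by_cases h2 : c = '\''
  · subst h2; decide
  by_cases h3 : c = '\\'
  · subst h3; decide
  by_cases h4 : c = '/'
  · subst h4; decide
  by_cases h5 : c = '.'
  · subst h5; decide
  by_cases h6 : c = '?'
  · subst h6; decide
  by_cases h7 : c = ':'
  · subst h7; decide
  by_cases h8 : c = '>'
  · subst h8; decide
  have hcontains : convA.contains c = false := by
    have : convA = PySem.Dict.mk
        [(' ', "_"), ('\'', ""), ('\\', ""), ('/', ""), ('.', ""), ('?', ""), (':', ""), ('>', "")] := by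
      decide
    rw [this]
    simp only [PySem.Dict.contains_mk]
    simp [Ne.symm h1, Ne.symm h2, Ne.symm h3, Ne.symm h4, Ne.symm h5, Ne.symm h6,
      Ne.symm h7, Ne.symm h8]
  simp [rep1, substA, h1, h2, h3, h4, h5, h6, h7, h8, hcontains]

theorem altList (input : String) :
    (filter_URL_alt input).toList = input.toList.flatMap substA := by
  unfold filter_URL_alt
  simp only [PySem.Str.toList_replace]
  simp only [show (" " : String).toList = [' '] from rfl,
    show ("_" : String).toList = ['_'] from rfl,
    show ("'" : String).toList = ['\''] from rfl,
    show ("\\" : String).toList = ['\\'] from rfl,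
    show ("/" : String).toList = ['/'] from rfl,
    show ("." : String).toList = ['.'] from rfl,
    show ("?" : String).toList = ['?'] from rfl,
    show (":" : String).toList = [':'] from rfl,
    show (">" : String).toList = ['>'] from rfl,
    show ("" : String).toList = ([] : List Char) from rfl]
  simp only [replace_single]
  simp only [List.flatMap_assoc]
  apply List.flatMap_congr
  intro c _
  exact composed_eq_substA c

-- ===== VERDICT (by name: the statement is the Claim_ definition above) =====
theorem filter_URL_spec : Claim_equal_filter_URL := by
  intro input _
  unfold Spec_filter_URL
  apply String.toList_inj.mp
  rw [altList]
  unfold filter_URL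
  simpa using foldA input.toList ""
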